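-- pv_equiv track=rewrite | github.com/Szymon-Czuszek/IP-Address-Tools | Sieci.py | get_ip_class_info
-- ===== SOURCE A (Python) =====
-- def get_ip_class_info(ip_address):
--     """
--     Determines the class information of an IP address.
--
--     Parameters:
--     - ip_address (str): The input IP address in dot-decimal, binary, or hex notation.
--
--     Returns:
--     - tuple: A tuple containing the IP class, subnet mask length, and default subnet mask.
--     """
--     # Convert the input IP address to dot-decimal notation
--     if any(c.isalpha() for c in ip_address):
--         # If it contains letters, assume hex
--         ip_address = '.'.join(str(int(octet, 16)) for octet in ip_address.split('.'))
--     elif ip_address.count('.') == 3 and len(ip_address.split('.')[0]) == 8: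
--         # If it has 8 characters until the first dot, assume binary
--         ip_address = '.'.join(str(int(octet, 2)) for octet in ip_address.split('.'))
--
--     first_octet = int(ip_address.split(".")[0])
--     if first_octet in range(0, 128):
--         return "A", 8, "255.0.0.0"
--     elif first_octet in range(128, 192):
--         return "B", 16, "255.255.0.0"
--     elif first_octet in range(192, 224):
--         return "C", 24, "255.255.255.0"
--     elif first_octet in range(224, 240):
--         return "D", None, None
--     elif first_octet in range(240, 256):
--         return "E", None, None
--     else:
--         raise ValueError(f"{ip_address} isn't a valid IP address!")
-- ===== SOURCE B (Python) =====
-- # B classifies by the classic leading-ones rule: count the leading 1-bits of the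
-- # first octet (A=0..., B=10..., C=110..., D=1110..., E=1111...) and compute the
-- # mask from that count, instead of rewriting the address and chaining range tests.
--
-- def get_ip_class_info(ip_address):
--     first = ip_address.split(".")[0]
--     if any(c.isalpha() for c in ip_address):
--         v = int(first, 16)
--     elif ip_address.count(".") == 3 and len(first) == 8:
--         v = int(first, 2)
--     else:
--         v = int(first)
--     if not 0 <= v < 256:
--         raise ValueError(f"{ip_address} isn't a valid IP address!")
--     n = 0
--     while n < 4 and v & (128 >> n):
--         n += 1
--     if n < 3:
--         return "ABCDE"[n], 8 * (n + 1), ".".join(["255"] * (n + 1) + ["0"] * (3 - n))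
--     return "ABCDE"[n], None, None
-- ===== Notes on version B (the rewrite author's own statement) =====
-- stated objective: simpler
-- what changed: B drops A's rewrite-the-whole-address-and-reparse normalization and its five-branch range-comparison chain: it parses only the first octet (in the base the notation implies) and classifies it by the classic leading-ones bit rule (A=0..., B=10..., C=110..., D=1110..., E=1111...), computing the mask string and length from the bit count instead of looking them up.
import Mathlib
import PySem

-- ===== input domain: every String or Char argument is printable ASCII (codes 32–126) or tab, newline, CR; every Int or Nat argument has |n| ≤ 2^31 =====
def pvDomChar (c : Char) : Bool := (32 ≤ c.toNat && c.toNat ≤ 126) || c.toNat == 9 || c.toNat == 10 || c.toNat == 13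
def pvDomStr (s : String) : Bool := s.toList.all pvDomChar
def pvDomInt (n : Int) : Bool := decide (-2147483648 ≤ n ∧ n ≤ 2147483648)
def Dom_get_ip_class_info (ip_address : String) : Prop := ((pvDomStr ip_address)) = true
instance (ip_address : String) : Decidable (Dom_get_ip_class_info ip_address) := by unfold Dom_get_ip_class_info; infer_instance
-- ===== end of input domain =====

-- B parses only the first octet (no whole-address rewrite) and classifies it by the classic
-- leading-ones bit rule (A=0..., B=10..., C=110..., D=1110..., E=1111...), computing the mask
-- from the bit count instead of A's five-branch range chain (objective: simpler).

-- ===== PORT A =====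
def get_ip_class_info (ip_address : String) : String × Option Int × Option String :=
  let cs := ip_address.toList
  let cs1 : List Char :=
    if cs.any (fun c => PySem.Chars.isalpha c) then
      -- ip_address = '.'.join(str(int(octet, 16)) for octet in ip_address.split('.'))
      match (PySem.Chars.splitOn cs ['.']).mapM (fun o => PySem.Int.ofCharsBase? o 16) with
      | some vs => PySem.Chars.join ['.'] (vs.map (fun v => PySem.Int.toChars v))
      | none => []   -- int() raises ValueError here: excluded by Pre_
    else if PySem.Chars.count cs ['.'] = 3 ∧ ((PySem.Chars.splitOn cs ['.']).headD []).length = 8 then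
      -- ip_address = '.'.join(str(int(octet, 2)) for octet in ip_address.split('.'))
      match (PySem.Chars.splitOn cs ['.']).mapM (fun o => PySem.Int.ofCharsBase? o 2) with
      | some vs => PySem.Chars.join ['.'] (vs.map (fun v => PySem.Int.toChars v))
      | none => []   -- int() raises ValueError here: excluded by Pre_
    else cs
  match PySem.Int.ofChars? ((PySem.Chars.splitOn cs1 ['.']).headD []) with
  | none => ("", none, none)   -- int() raises ValueError here: excluded by Pre_
  | some first_octet =>
    if 0 ≤ first_octet ∧ first_octet < 128 then ("A", some 8, some "255.0.0.0")
    else if 128 ≤ first_octet ∧ first_octet < 192 then ("B", some 16, some "255.255.0.0")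
    else if 192 ≤ first_octet ∧ first_octet < 224 then ("C", some 24, some "255.255.255.0")
    else if 224 ≤ first_octet ∧ first_octet < 240 then ("D", none, none)
    else if 240 ≤ first_octet ∧ first_octet < 256 then ("E", none, none)
    else ("", none, none)      -- raise ValueError: excluded by Pre_

-- ===== PORT B =====
-- B's while loop 'while n < 4 and v & (128 >> n): n += 1'; the fuel argument (= 4,
-- enough since the loop condition caps n at 4) only makes the recursion structural.
def pvLeadOnes (v : Int) (fuel : Nat) (n : Nat) : Nat :=
  match fuel with
  | 0 => n
  | fuel' + 1 =>
    if n < 4 ∧ (Int.land v (Int.ofNat (Nat.shiftRight 128 n))) ≠ 0 then pvLeadOnes v fuel' (n + 1)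
    else n

def get_ip_class_info_alt (ip_address : String) : String × Option Int × Option String :=
  let cs := ip_address.toList
  let first := (PySem.Chars.splitOn cs ['.']).headD []
  let fv : Option Int :=
    if cs.any (fun c => PySem.Chars.isalpha c) then PySem.Int.ofCharsBase? first 16
    else if PySem.Chars.count cs ['.'] = 3 ∧ first.length = 8 then PySem.Int.ofCharsBase? first 2
    else PySem.Int.ofChars? first
  match fv with
  | none => ("", none, none)   -- int() raises ValueError here: excluded by Pre_
  | some v =>
    if 0 ≤ v ∧ v < 256 then
      let n := pvLeadOnes v 4 0
      let cls := String.ofList [(['A', 'B', 'C', 'D', 'E'].getD n 'A')]   -- "ABCDE"[n], n ≤ 4 always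
      if n < 3 then
        (cls, some (8 * ((n : Int) + 1)),
         some (String.ofList (PySem.Chars.join ['.']
           (List.replicate (n + 1) ['2', '5', '5'] ++ List.replicate (3 - n) ['0']))))
      else (cls, none, none)
    else ("", none, none)      -- raise ValueError: excluded by Pre_

-- ===== PRECONDITION & SPEC =====
-- Pre_ admits exactly the inputs on which A returns (A raises ValueError when an octet that
-- int() must parse fails to parse — the first octet always, every octet in the hex/binary
-- branches — or when the first octet's value lies outside 0..255).
def Pre_get_ip_class_info (ip_address : String) : Prop :=
  let cs := ip_address.toList
  let parts := PySem.Chars.splitOn cs ['.']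
  let first := parts.headD []
  if cs.any (fun c => PySem.Chars.isalpha c) then
    (∀ o ∈ parts, (PySem.Int.ofCharsBase? o 16).isSome = true) ∧
    0 ≤ (PySem.Int.ofCharsBase? first 16).getD (-1) ∧ (PySem.Int.ofCharsBase? first 16).getD (-1) < 256
  else if PySem.Chars.count cs ['.'] = 3 ∧ first.length = 8 then
    (∀ o ∈ parts, (PySem.Int.ofCharsBase? o 2).isSome = true) ∧
    0 ≤ (PySem.Int.ofCharsBase? first 2).getD (-1) ∧ (PySem.Int.ofCharsBase? first 2).getD (-1) < 256
  else
    0 ≤ (PySem.Int.ofChars? first).getD (-1) ∧ (PySem.Int.ofChars? first).getD (-1) < 256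
instance (ip_address : String) : Decidable (Pre_get_ip_class_info ip_address) := by unfold Pre_get_ip_class_info; infer_instance

def pvWitness_get_ip_class_info : String := "10.0.0.1"

def Spec_get_ip_class_info (ip_address : String) (out : String × Option Int × Option String) : Prop := out = get_ip_class_info_alt ip_address
instance (ip_address : String) (out : String × Option Int × Option String) : Decidable (Spec_get_ip_class_info ip_address out) := by unfold Spec_get_ip_class_info; infer_instance

-- ===== CLAIM (what is proved, stated in full; the proofs are below) =====
def Claim_equal_get_ip_class_info : Prop := ∀ (ip_address : String), Dom_get_ip_class_info ip_address → Pre_get_ip_class_info ip_address → Spec_get_ip_class_info ip_address (get_ip_class_info ip_address)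

-- ===== LEMMAS AND PROOFS =====

theorem pv_go_acc (sep : List Char) (fuel : Nat) (l cur : List Char) (acc : List (List Char)) :
    PySem.Chars.splitOn.go sep fuel l cur acc = acc.reverse ++ PySem.Chars.splitOn.go sep fuel l cur [] := by
  induction fuel generalizing l cur acc with
  | zero => simp [PySem.Chars.splitOn.go]
  | succ n ih =>
    cases l with
    | nil => simp [PySem.Chars.splitOn.go]
    | cons c rest =>
      simp only [PySem.Chars.splitOn.go]
      by_cases hp : sep.isPrefixOf (c :: rest) = true
      · simp only [hp, if_pos]
        rw [ih _ _ (cur.reverse :: acc), ih _ _ [cur.reverse]]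
        simp
      · simp only [hp, Bool.false_eq_true]
        exact ih rest (c :: cur) acc

theorem pv_head_go (c : Char) (fuel : Nat) (l cur : List Char) (hf : l.length ≤ fuel) :
    (PySem.Chars.splitOn.go [c] fuel l cur []).headD [] = cur.reverse ++ l.takeWhile (fun x => x ≠ c) := by
  induction fuel generalizing l cur with
  | zero =>
    have : l = [] := by cases l <;> simp_all
    subst this
    simp [PySem.Chars.splitOn.go]
  | succ n ih =>
    cases l with
    | nil => simp [PySem.Chars.splitOn.go]
    | cons a rest =>
      simp only [PySem.Chars.splitOn.go]
      by_cases hp : List.isPrefixOf [c] (a :: rest) = true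
      · have hac : a = c := by
          simp [List.isPrefixOf] at hp; exact hp.symm
        rw [if_pos hp, pv_go_acc]
        subst hac
        simp [List.takeWhile]
      · have hac : ¬ a = c := by
          simp [List.isPrefixOf] at hp; exact fun h => hp (by simp [h])
        rw [if_neg hp, ih rest (a :: cur) (by simpa using Nat.le_of_succ_le_succ hf)]
        simp [List.takeWhile, hac]

theorem pv_head_splitOn (c : Char) (s : List Char) :
    (PySem.Chars.splitOn s [c]).headD [] = s.takeWhile (fun x => x ≠ c) := by
  rw [PySem.Chars.splitOn]
  exact pv_head_go c (s.length + 1) s [] (by omega)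

set_option maxRecDepth 4096 in
theorem pv_roundtrip (m : Nat) (h : m < 256) :
    PySem.Int.ofChars? (PySem.Int.toChars (m : Int)) = some (m : Int) ∧
    (PySem.Int.toChars (m : Int)).all (fun ch => ch ≠ '.') = true := by
  revert h; revert m; decide

-- A's five-branch range chain agrees with B's leading-ones classification on 0..255
set_option maxRecDepth 4096 in
theorem pv_classify (m : Nat) (h : m < 256) :
    (if 0 ≤ (m : Int) ∧ (m : Int) < 128 then (("A", some 8, some "255.0.0.0") : String × Option Int × Option String)
     else if 128 ≤ (m : Int) ∧ (m : Int) < 192 then ("B", some 16, some "255.255.0.0")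
     else if 192 ≤ (m : Int) ∧ (m : Int) < 224 then ("C", some 24, some "255.255.255.0")
     else if 224 ≤ (m : Int) ∧ (m : Int) < 240 then ("D", none, none)
     else if 240 ≤ (m : Int) ∧ (m : Int) < 256 then ("E", none, none)
     else ("", none, none)) =
    (let n := pvLeadOnes (m : Int) 4 0
     let cls := String.ofList [(['A', 'B', 'C', 'D', 'E'].getD n 'A')]
     if n < 3 then
       (cls, some (8 * ((n : Int) + 1)),
        some (String.ofList (PySem.Chars.join ['.']
          (List.replicate (n + 1) ['2', '5', '5'] ++ List.replicate (3 - n) ['0']))))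
     else (cls, none, none)) := by
  revert h; revert m; decide

theorem pv_mapM_some (f : List Char → Option Int) (l : List (List Char))
    (h : ∀ o ∈ l, (f o).isSome = true) :
    l.mapM f = some (l.map (fun o => (f o).getD 0)) := by
  induction l with
  | nil => rfl
  | cons a t ih =>
    have ha : (f a).isSome = true := h a (by simp)
    obtain ⟨v, hv⟩ := Option.isSome_iff_exists.mp ha
    rw [List.mapM_cons, hv, ih (fun o ho => h o (by simp [ho]))]
    simp [hv]

theorem pv_takeWhile_append (p : Char → Bool) (xs ys : List Char) (h : xs.all p = true) :
    (xs ++ ys).takeWhile p = xs ++ ys.takeWhile p := by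
  induction xs with
  | nil => simp
  | cons a t ih => simp_all

theorem pv_roundtrip_int (v : Int) (h0 : 0 ≤ v) (h1 : v < 256) :
    PySem.Int.ofChars? (PySem.Int.toChars v) = some v ∧
    (PySem.Int.toChars v).all (fun ch => ch ≠ '.') = true := by
  have hm : v = ((v.toNat : Nat) : Int) := (Int.toNat_of_nonneg h0).symm
  rw [hm]
  exact pv_roundtrip v.toNat (by omega)

theorem pv_chain_eq_bits (v : Int) (h0 : 0 ≤ v) (h1 : v < 256) :
    (if 0 ≤ v ∧ v < 128 then (("A", some 8, some "255.0.0.0") : String × Option Int × Option String)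
     else if 128 ≤ v ∧ v < 192 then ("B", some 16, some "255.255.0.0")
     else if 192 ≤ v ∧ v < 224 then ("C", some 24, some "255.255.255.0")
     else if 224 ≤ v ∧ v < 240 then ("D", none, none)
     else if 240 ≤ v ∧ v < 256 then ("E", none, none)
     else ("", none, none)) =
    (let n := pvLeadOnes v 4 0
     let cls := String.ofList [(['A', 'B', 'C', 'D', 'E'].getD n 'A')]
     if n < 3 then
       (cls, some (8 * ((n : Int) + 1)),
        some (String.ofList (PySem.Chars.join ['.']
          (List.replicate (n + 1) ['2', '5', '5'] ++ List.replicate (3 - n) ['0']))))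
     else (cls, none, none)) := by
  have hm : v = ((v.toNat : Nat) : Int) := (Int.toNat_of_nonneg h0).symm
  rw [hm]
  exact pv_classify v.toNat (by omega)

-- the first piece of the rebuilt dot-decimal address is str(first value)
theorem pv_rebuilt_head (v : Int) (h0 : 0 ≤ v) (h1 : v < 256) (rest : List (List Char)) :
    (PySem.Chars.splitOn (PySem.Chars.join ['.'] (PySem.Int.toChars v :: rest)) ['.']).headD []
      = PySem.Int.toChars v := by
  have hdot := (pv_roundtrip_int v h0 h1).2
  rw [pv_head_splitOn]
  cases rest with
  | nil =>
    rw [PySem.Chars.join_singleton]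
    have := pv_takeWhile_append (fun x => x ≠ '.') (PySem.Int.toChars v) [] hdot
    simpa using this
  | cons b t =>
    rw [PySem.Chars.join_cons_cons]
    rw [List.append_assoc, pv_takeWhile_append (fun x => x ≠ '.') (PySem.Int.toChars v) _ hdot]
    simp

-- in a normalizing branch A rebuilds the address and reparses; B parses the first piece directly
theorem pv_norm_branch (cs : List Char) (base : Int)
    (hb : PySem.Int.ofCharsBase? [] base = none)
    (hall : ∀ o ∈ PySem.Chars.splitOn cs ['.'], (PySem.Int.ofCharsBase? o base).isSome = true)
    (h0 : 0 ≤ (PySem.Int.ofCharsBase? ((PySem.Chars.splitOn cs ['.']).headD []) base).getD (-1))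
    (h1 : (PySem.Int.ofCharsBase? ((PySem.Chars.splitOn cs ['.']).headD []) base).getD (-1) < 256) :
    (match PySem.Int.ofChars? ((PySem.Chars.splitOn
        (match (PySem.Chars.splitOn cs ['.']).mapM (fun o => PySem.Int.ofCharsBase? o base) with
         | some vs => PySem.Chars.join ['.'] (vs.map (fun v => PySem.Int.toChars v))
         | none => []) ['.']).headD []) with
     | none => (("", none, none) : String × Option Int × Option String)
     | some first_octet =>
       if 0 ≤ first_octet ∧ first_octet < 128 then ("A", some 8, some "255.0.0.0")
       else if 128 ≤ first_octet ∧ first_octet < 192 then ("B", some 16, some "255.255.0.0")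
       else if 192 ≤ first_octet ∧ first_octet < 224 then ("C", some 24, some "255.255.255.0")
       else if 224 ≤ first_octet ∧ first_octet < 240 then ("D", none, none)
       else if 240 ≤ first_octet ∧ first_octet < 256 then ("E", none, none)
       else ("", none, none)) =
    (match PySem.Int.ofCharsBase? ((PySem.Chars.splitOn cs ['.']).headD []) base with
     | none => ("", none, none)
     | some v =>
       if 0 ≤ v ∧ v < 256 then
         let n := pvLeadOnes v 4 0
         let cls := String.ofList [(['A', 'B', 'C', 'D', 'E'].getD n 'A')]
         if n < 3 then
           (cls, some (8 * ((n : Int) + 1)),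
            some (String.ofList (PySem.Chars.join ['.']
              (List.replicate (n + 1) ['2', '5', '5'] ++ List.replicate (3 - n) ['0']))))
         else (cls, none, none)
       else ("", none, none)) := by
  cases hp : PySem.Chars.splitOn cs ['.'] with
  | nil =>
    rw [hp] at h0
    simp [hb] at h0
  | cons p ps =>
    rw [hp] at hall h0 h1
    simp only [List.headD_cons] at h0 h1 ⊢
    cases hv : PySem.Int.ofCharsBase? p base with
    | none => rw [hv] at h0; simp at h0
    | some v =>
      rw [hv] at h0 h1
      simp only [Option.getD_some] at h0 h1
      rw [pv_mapM_some _ _ hall]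
      simp only [List.map_cons, hv, Option.getD_some]
      rw [pv_rebuilt_head v h0 h1]
      rw [(pv_roundtrip_int v h0 h1).1]
      have h2 : (0:Int) ≤ v ∧ v < 256 := ⟨h0, h1⟩
      simpa only [if_pos h2] using pv_chain_eq_bits v h0 h1

-- ===== VERDICT (by name: the statement is the Claim_ definition above) =====
theorem get_ip_class_info_spec : Claim_equal_get_ip_class_info := by
  intro ip _ hpre
  unfold Spec_get_ip_class_info
  simp only [Pre_get_ip_class_info] at hpre
  simp only [get_ip_class_info, get_ip_class_info_alt]
  by_cases halpha : (ip.toList.any (fun c => PySem.Chars.isalpha c)) = true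
  · rw [if_pos halpha] at hpre ⊢
    rw [if_pos halpha]
    obtain ⟨hall, h0, h1⟩ := hpre
    exact pv_norm_branch ip.toList 16 (by decide) hall h0 h1
  · rw [if_neg halpha] at hpre ⊢
    rw [if_neg halpha]
    by_cases hbin : PySem.Chars.count ip.toList ['.'] = 3 ∧
        ((PySem.Chars.splitOn ip.toList ['.']).headD []).length = 8
    · rw [if_pos hbin] at hpre ⊢
      rw [if_pos hbin]
      obtain ⟨hall, h0, h1⟩ := hpre
      exact pv_norm_branch ip.toList 2 (by decide) hall h0 h1
    · rw [if_neg hbin] at hpre ⊢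
      rw [if_neg hbin]
      obtain ⟨h0, h1⟩ := hpre
      cases hv : PySem.Int.ofChars? ((PySem.Chars.splitOn ip.toList ['.']).headD []) with
      | none => rfl
      | some v =>
        rw [hv] at h0 h1
        simp only [Option.getD_some] at h0 h1
        have h2 : (0:Int) ≤ v ∧ v < 256 := ⟨h0, by omega⟩
        simpa only [if_pos h2] using pv_chain_eq_bits v h0 h2.2
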